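-- pv_equiv track=rewrite | github.com/christianrosdahl/aoc2024 | day09.py | get_moved_files
-- ===== SOURCE A (Python) =====
-- def get_moved_files(files, free_spaces):
--     moved_files = {}
--     for file in reversed(files):
--         file_size = file[1]
--         free_space_index = move_to_free_space(file, free_spaces)
--         if free_space_index >= 0:
--             if free_space_index in moved_files:
--                 moved_files[free_space_index].append(file)
--             else:
--                 moved_files[free_space_index] = [file]
--             free_spaces[free_space_index] -= file_size
--     return moved_files
--
-- def move_to_free_space(file, free_spaces):
--     file_index, file_size = file
--     for space_index, space in enumerate(free_spaces[:-1]):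
--         if file_index > space_index and space >= file_size:
--             return space_index
--     return -1
-- ===== SOURCE B (Python) =====
-- # B: segment-tree (max over slot capacities) giving the leftmost sufficient slot in
-- # O(log n) per file instead of A's linear rescan. Like A, mutates free_spaces in place.
--
-- def _build(caps, lo, hi):
--     if hi - lo <= 1:
--         return (caps[lo], None, None)
--     mid = (lo + hi) // 2
--     l = _build(caps, lo, mid)
--     r = _build(caps, mid, hi)
--     return (max(l[0], r[0]), l, r)
--
-- def _query(t, lo, hi, limit, need):
--     # leftmost index i with lo <= i < min(hi, limit) and capacity(i) >= need, else -1
--     if limit <= lo or t[0] < need: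
--         return -1
--     if t[1] is None:
--         return lo
--     mid = (lo + hi) // 2
--     res = _query(t[1], lo, mid, limit, need)
--     if res >= 0:
--         return res
--     return _query(t[2], mid, hi, limit, need)
--
-- def _update(t, lo, hi, i, delta):
--     if t[1] is None:
--         return (t[0] - delta, None, None)
--     mid = (lo + hi) // 2
--     if i < mid:
--         l = _update(t[1], lo, mid, i, delta)
--         r = t[2]
--     else:
--         l = t[1]
--         r = _update(t[2], mid, hi, i, delta)
--     return (max(l[0], r[0]), l, r)
--
-- def get_moved_files(files, free_spaces):
--     moved_files = {}
--     n = len(free_spaces) - 1  # only free_spaces[:-1] is ever usable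
--     if n <= 0:
--         return moved_files
--     tree = _build(free_spaces, 0, n)
--     for file in reversed(files):
--         idx, size = file
--         limit = min(idx, n)
--         i = _query(tree, 0, n, limit, size)
--         if i >= 0:
--             moved_files.setdefault(i, []).append(file)
--             tree = _update(tree, 0, n, i, size)
--             free_spaces[i] -= size
--     return moved_files
-- ===== Notes on version B (the rewrite author's own statement) =====
-- stated objective: faster
-- what changed: A rescans the free-space list from the left for every file (O(n) per file); B builds a segment tree of slot capacities keyed by maximum and finds the leftmost sufficient slot with an O(log n) descent plus an O(log n) point update, keeping the same dict-building and the same in-place mutation of free_spaces.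
import Mathlib
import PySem

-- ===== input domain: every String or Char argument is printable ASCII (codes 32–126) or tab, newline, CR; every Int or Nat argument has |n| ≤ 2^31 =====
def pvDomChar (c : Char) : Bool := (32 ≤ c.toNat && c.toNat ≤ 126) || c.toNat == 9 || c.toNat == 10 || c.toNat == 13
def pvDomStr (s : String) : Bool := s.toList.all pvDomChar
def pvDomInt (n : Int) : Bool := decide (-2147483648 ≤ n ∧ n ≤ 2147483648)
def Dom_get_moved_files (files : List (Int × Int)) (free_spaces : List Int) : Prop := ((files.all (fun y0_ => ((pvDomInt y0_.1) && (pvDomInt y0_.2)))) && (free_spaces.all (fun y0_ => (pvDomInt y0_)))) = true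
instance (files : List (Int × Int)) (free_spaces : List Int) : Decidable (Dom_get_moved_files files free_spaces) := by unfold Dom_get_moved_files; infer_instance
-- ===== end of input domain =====

-- B replaces A's per-file linear scan of the free slots by a segment tree (max capacity)
-- with a leftmost-sufficient-slot query and a point update.  Both Pythons mutate
-- free_spaces in place identically; the equivalence proved here is about the return value.

-- ===== PORT A =====
-- the 'for space_index, space in enumerate(free_spaces[:-1])' scan with early return
def pvMtfsLoop (pairs : List (Int × Int)) (fi fsz : Int) : Int :=
  match pairs with
  | [] => -1
  | (si, sp) :: rest => if fi > si ∧ sp ≥ fsz then si else pvMtfsLoop rest fi fsz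

def move_to_free_space (file : Int × Int) (free_spaces : List Int) : Int :=
  pvMtfsLoop (PySem.List.enumerate (PySem.List.slice free_spaces none (some (-1))) 0) file.1 file.2

-- loop body of A; 'free_spaces[i] -= size' has i = fsi.toNat, in range whenever fsi ≥ 0
def pvStepA (st : PySem.Dict Int (List (Int × Int)) × List Int) (file : Int × Int) :
    PySem.Dict Int (List (Int × Int)) × List Int :=
  let fsi := move_to_free_space file st.2
  if fsi ≥ 0 then
    (if st.1.contains fsi then st.1.modify fsi [] (· ++ [file]) else st.1.insert fsi [file],
     st.2.set fsi.toNat (st.2.getD fsi.toNat 0 - file.2))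
  else st

def get_moved_files (files : List (Int × Int)) (free_spaces : List Int) : List (Int × List (Int × Int)) :=
  (files.reverse.foldl pvStepA (PySem.Dict.empty, free_spaces)).1.items

-- ===== PORT B =====
-- segment tree node: Python tuples (v, None, None) / (m, l, r)
inductive PvSeg : Type
  | leaf : Int → PvSeg
  | node : Int → PvSeg → PvSeg → PvSeg

def PvSeg.maxv : PvSeg → Int
  | .leaf v => v
  | .node m _ _ => m

-- _build; Python's guard is 'hi - lo <= 1' (same test, written on Nat)
def pvBuild (caps : List Int) (lo hi : Nat) : PvSeg :=
  if hi ≤ lo + 1 then .leaf (caps.getD lo 0)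
  else
    let mid := (lo + hi) / 2
    let l := pvBuild caps lo mid
    let r := pvBuild caps mid hi
    .node (max l.maxv r.maxv) l r
termination_by hi - lo
decreasing_by all_goals omega

-- _query; Python's 't[1] is None' leaf test becomes the structural match
def pvQuery (t : PvSeg) (lo hi : Nat) (limit need : Int) : Int :=
  if limit ≤ (lo : Int) ∨ t.maxv < need then -1
  else match t with
    | .leaf _ => (lo : Int)
    | .node _ l r =>
      let mid := (lo + hi) / 2
      let res := pvQuery l lo mid limit need
      if res ≥ 0 then res else pvQuery r mid hi limit need

-- _update
def pvUpdate (t : PvSeg) (lo hi i : Nat) (delta : Int) : PvSeg :=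
  match t with
  | .leaf v => .leaf (v - delta)
  | .node _ l r =>
    let mid := (lo + hi) / 2
    if i < mid then
      let l' := pvUpdate l lo mid i delta
      .node (max l'.maxv r.maxv) l' r
    else
      let r' := pvUpdate r mid hi i delta
      .node (max l.maxv r'.maxv) l r'

-- loop body of B (state: tree, moved_files, free_spaces)
def pvStepB (nn : Nat) (st : PvSeg × PySem.Dict Int (List (Int × Int)) × List Int)
    (file : Int × Int) : PvSeg × PySem.Dict Int (List (Int × Int)) × List Int :=
  let limit := min file.1 (nn : Int)
  let i := pvQuery st.1 0 nn limit file.2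
  if i ≥ 0 then
    (pvUpdate st.1 0 nn i.toNat file.2,
     (st.2.1.setdefault i []).modify i [] (· ++ [file]),
     st.2.2.set i.toNat (st.2.2.getD i.toNat 0 - file.2))
  else st

def get_moved_files_alt (files : List (Int × Int)) (free_spaces : List Int) : List (Int × List (Int × Int)) :=
  if free_spaces.length ≤ 1 then []   -- n = len(free_spaces) - 1; if n <= 0: return {}
  else
    let nn := free_spaces.length - 1
    (files.reverse.foldl (pvStepB nn) (pvBuild free_spaces 0 nn, PySem.Dict.empty, free_spaces)).2.1.items

-- ===== PRECONDITION & SPEC =====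
def Spec_get_moved_files (files : List (Int × Int)) (free_spaces : List Int) (out : List (Int × List (Int × Int))) : Prop := out = get_moved_files_alt files free_spaces
instance (files : List (Int × Int)) (free_spaces : List Int) (out : List (Int × List (Int × Int))) : Decidable (Spec_get_moved_files files free_spaces out) := by unfold Spec_get_moved_files; infer_instance

-- ===== CLAIM (what is proved, stated in full; the proofs are below) =====
def Claim_equal_get_moved_files : Prop := ∀ (files : List (Int × Int)) (free_spaces : List Int), Dom_get_moved_files files free_spaces → Spec_get_moved_files files free_spaces (get_moved_files files free_spaces)

-- ===== LEMMAS AND PROOFS =====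

-- specification of 'leftmost index i ≥ s with i < limit and capacity ≥ need' as a scan
def pvFirstFit : List Int → Nat → Int → Int → Int
  | [], _, _, _ => -1
  | c :: rest, s, limit, need =>
    if (s : Int) < limit ∧ need ≤ c then (s : Int) else pvFirstFit rest (s + 1) limit need

theorem pvFirstFit_cases (xs : List Int) (s : Nat) (limit need : Int) :
    pvFirstFit xs s limit need = -1 ∨
      ((s : Int) ≤ pvFirstFit xs s limit need ∧
        pvFirstFit xs s limit need < (s : Int) + xs.length) := by
  induction xs generalizing s with
  | nil => left; rfl
  | cons c rest ih =>
    simp only [pvFirstFit]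
    split
    · right
      refine ⟨le_refl _, ?_⟩
      simp only [List.length_cons]
      push_cast
      omega
    · rcases ih (s + 1) with h | h
      · left; exact h
      · right; simp only [List.length_cons] at h ⊢; push_cast at h ⊢; omega

theorem pvFirstFit_limit_nonpos (xs : List Int) (s : Nat) (limit need : Int)
    (h : limit ≤ (s : Int)) : pvFirstFit xs s limit need = -1 := by
  induction xs generalizing s with
  | nil => rfl
  | cons c rest ih =>
    simp only [pvFirstFit]
    rw [if_neg (by omega)]
    exact ih (s + 1) (by push_cast; omega)

theorem pvFirstFit_all_lt (xs : List Int) (s : Nat) (limit need : Int)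
    (h : ∀ c ∈ xs, c < need) : pvFirstFit xs s limit need = -1 := by
  induction xs generalizing s with
  | nil => rfl
  | cons c rest ih =>
    simp only [pvFirstFit]
    rw [if_neg (by have := h c (by simp); omega)]
    exact ih (s + 1) (fun c hc => h c (by simp [hc]))

theorem pvFirstFit_append (xs ys : List Int) (s : Nat) (limit need : Int) :
    pvFirstFit (xs ++ ys) s limit need =
      if pvFirstFit xs s limit need = -1 then pvFirstFit ys (s + xs.length) limit need
      else pvFirstFit xs s limit need := by
  induction xs generalizing s with
  | nil => simp [pvFirstFit]
  | cons c rest ih =>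
    simp only [List.cons_append, pvFirstFit]
    split
    · rw [if_neg (by omega)]
    · rw [ih (s + 1)]
      simp only [List.length_cons]
      congr 2
      omega

theorem pvFirstFit_min (xs : List Int) (s : Nat) (limit bound need : Int)
    (h : (s : Int) + xs.length ≤ bound) :
    pvFirstFit xs s (min limit bound) need = pvFirstFit xs s limit need := by
  induction xs generalizing s with
  | nil => rfl
  | cons c rest ih =>
    simp only [pvFirstFit, List.length_cons] at h ⊢
    have hs : (s : Int) < bound := by push_cast at h; omega
    have : ((s : Int) < min limit bound ∧ need ≤ c) ↔ ((s : Int) < limit ∧ need ≤ c) := by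
      constructor <;> intro ⟨h1, h2⟩ <;> exact ⟨by omega, h2⟩
    rw [if_congr this rfl rfl, ih (s + 1) (by push_cast at h ⊢; omega)]

-- the tree t represents caps over the index window [lo, hi)
def pvSegOk : PvSeg → List Int → Nat → Nat → Prop
  | .leaf v, caps, lo, hi => hi = lo + 1 ∧ lo < caps.length ∧ caps.getD lo 0 = v
  | .node m l r, caps, lo, hi =>
      lo + 1 < hi ∧ pvSegOk l caps lo ((lo + hi) / 2) ∧
        pvSegOk r caps ((lo + hi) / 2) hi ∧ m = max l.maxv r.maxv

def pvSegSeg (caps : List Int) (lo hi : Nat) : List Int := (caps.drop lo).take (hi - lo)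

theorem pvSegOk_bounds (t : PvSeg) (caps : List Int) (lo hi : Nat)
    (h : pvSegOk t caps lo hi) : lo < hi ∧ hi ≤ caps.length := by
  induction t generalizing lo hi with
  | leaf v => obtain ⟨h1, h2, _⟩ := h; omega
  | node m l r ihl ihr =>
    obtain ⟨h1, hl, hr, _⟩ := h
    have := ihl _ _ hl
    have := ihr _ _ hr
    omega

theorem pvSegSeg_split (caps : List Int) (lo mid hi : Nat) (h1 : lo ≤ mid) (h2 : mid ≤ hi) :
    pvSegSeg caps lo hi = pvSegSeg caps lo mid ++ pvSegSeg caps mid hi := by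
  unfold pvSegSeg
  have : hi - lo = (mid - lo) + (hi - mid) := by omega
  rw [this, List.take_add]
  have hd : (caps.drop lo).drop (mid - lo) = caps.drop mid := by
    rw [List.drop_drop]
    congr 1
    omega
  rw [hd]

theorem pvSegSeg_length (caps : List Int) (lo hi : Nat) (_h1 : lo ≤ hi) (h2 : hi ≤ caps.length) :
    (pvSegSeg caps lo hi).length = hi - lo := by
  unfold pvSegSeg
  simp [List.length_take, List.length_drop]
  omega

theorem pvSegSeg_leaf (caps : List Int) (lo : Nat) (h : lo < caps.length) :
    pvSegSeg caps lo (lo + 1) = [caps.getD lo 0] := by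
  unfold pvSegSeg
  rw [show lo + 1 - lo = 1 from by omega, List.drop_eq_getElem_cons h,
    List.take_succ_cons, List.take_zero, List.getD_eq_getElem caps 0 h]

theorem pvSegOk_mem_le (t : PvSeg) (caps : List Int) (lo hi : Nat)
    (h : pvSegOk t caps lo hi) : ∀ c ∈ pvSegSeg caps lo hi, c ≤ t.maxv := by
  induction t generalizing lo hi with
  | leaf v =>
    obtain ⟨h1, h2, h3⟩ := h
    subst h1
    rw [pvSegSeg_leaf caps lo h2]
    intro c hc
    simp at hc
    simp [PvSeg.maxv, hc, ← h3]
  | node m l r ihl ihr =>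
    obtain ⟨h1, hl, hr, hm⟩ := h
    have hbl := pvSegOk_bounds _ _ _ _ hl
    have hbr := pvSegOk_bounds _ _ _ _ hr
    intro c hc
    rw [pvSegSeg_split caps lo ((lo + hi) / 2) hi (by omega) (by omega)] at hc
    simp only [PvSeg.maxv, hm]
    rcases List.mem_append.mp hc with h | h
    · exact le_trans (ihl _ _ hl c h) (le_max_left _ _)
    · exact le_trans (ihr _ _ hr c h) (le_max_right _ _)

theorem pvQuery_eq (t : PvSeg) (caps : List Int) (lo hi : Nat) (limit need : Int)
    (h : pvSegOk t caps lo hi) :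
    pvQuery t lo hi limit need = pvFirstFit (pvSegSeg caps lo hi) lo limit need := by
  induction t generalizing lo hi with
  | leaf v =>
    obtain ⟨h1, h2, h3⟩ := h
    subst h1
    rw [pvSegSeg_leaf caps lo h2]
    simp only [pvQuery, PvSeg.maxv, pvFirstFit, ← h3]
    by_cases hc : limit ≤ (lo : Int) ∨ caps.getD lo 0 < need
    · rw [if_pos hc, if_neg (by omega)]
    · rw [if_neg hc, if_pos (by omega)]
  | node m l r ihl ihr =>
    obtain ⟨h1, hl, hr, hm⟩ := h
    have hbl := pvSegOk_bounds _ _ _ _ hl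
    have hbr := pvSegOk_bounds _ _ _ _ hr
    rw [pvSegSeg_split caps lo ((lo + hi) / 2) hi (by omega) (by omega),
        pvFirstFit_append]
    simp only [pvQuery]
    by_cases hc : limit ≤ (lo : Int) ∨ PvSeg.maxv (.node m l r) < need
    · rw [if_pos hc]
      rcases hc with hc | hc
      · rw [pvFirstFit_limit_nonpos _ _ _ _ hc, if_pos rfl,
            pvFirstFit_limit_nonpos _ _ _ _ (by push_cast; omega)]
      · simp only [PvSeg.maxv, hm] at hc
        rw [pvFirstFit_all_lt _ _ _ _
            (fun c hcm => lt_of_le_of_lt (le_trans (pvSegOk_mem_le _ _ _ _ hl c hcm) (le_max_left _ _)) hc),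
          if_pos rfl,
          pvFirstFit_all_lt _ _ _ _
            (fun c hcm => lt_of_le_of_lt (le_trans (pvSegOk_mem_le _ _ _ _ hr c hcm) (le_max_right _ _)) hc)]
    · rw [if_neg hc]
      have hlen : (pvSegSeg caps lo ((lo + hi) / 2)).length = (lo + hi) / 2 - lo :=
        pvSegSeg_length _ _ _ (by omega) (by omega)
      have hmid : lo + (pvSegSeg caps lo ((lo + hi) / 2)).length = (lo + hi) / 2 := by omega
      rw [ihl _ _ hl, ihr _ _ hr, hmid]
      rcases pvFirstFit_cases (pvSegSeg caps lo ((lo + hi) / 2)) lo limit need with hv | hv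
      · rw [hv]
        rw [if_neg (show ¬((-1 : Int) ≥ 0) by omega), if_pos rfl]
      · rw [if_pos (show pvFirstFit (pvSegSeg caps lo ((lo + hi) / 2)) lo limit need ≥ 0 by omega),
          if_neg (show ¬(pvFirstFit (pvSegSeg caps lo ((lo + hi) / 2)) lo limit need = -1) by omega)]

theorem pvSegOk_congr (t : PvSeg) (caps caps' : List Int) (lo hi : Nat)
    (hlen : caps'.length = caps.length)
    (hag : ∀ j, lo ≤ j → j < hi → caps'.getD j 0 = caps.getD j 0)
    (h : pvSegOk t caps lo hi) : pvSegOk t caps' lo hi := by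
  induction t generalizing lo hi with
  | leaf v =>
    obtain ⟨h1, h2, h3⟩ := h
    exact ⟨h1, by omega, by rw [hag lo (le_refl _) (by omega)]; exact h3⟩
  | node m l r ihl ihr =>
    obtain ⟨h1, hl, hr, hm⟩ := h
    exact ⟨h1, ihl _ _ (fun j hj1 hj2 => hag j hj1 (by omega)) hl,
      ihr _ _ (fun j hj1 hj2 => hag j (by omega) hj2) hr, hm⟩

theorem pvUpdate_ok (t : PvSeg) (caps : List Int) (lo hi i : Nat) (delta : Int)
    (h : pvSegOk t caps lo hi) (hi1 : lo ≤ i) (hi2 : i < hi) :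
    pvSegOk (pvUpdate t lo hi i delta) (caps.set i (caps.getD i 0 - delta)) lo hi := by
  induction t generalizing lo hi with
  | leaf v =>
    obtain ⟨h1, h2, h3⟩ := h
    have hieq : i = lo := by omega
    subst hieq
    refine ⟨h1, by simpa using h2, ?_⟩
    simp [List.getD, h2, ← h3]
  | node m l r ihl ihr =>
    obtain ⟨h1, hl, hr, hm⟩ := h
    have hbl := pvSegOk_bounds _ _ _ _ hl
    have hbr := pvSegOk_bounds _ _ _ _ hr
    have hlen : (caps.set i (caps.getD i 0 - delta)).length = caps.length := by simp
    have hne : ∀ j, j ≠ i → (caps.set i (caps.getD i 0 - delta)).getD j 0 = caps.getD j 0 := by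
      intro j hj
      simp [List.getD, List.getElem?_set_ne (Ne.symm hj)]
    simp only [pvUpdate]
    by_cases hcase : i < (lo + hi) / 2
    · rw [if_pos hcase]
      exact ⟨h1, ihl _ _ hl hi1 hcase,
        pvSegOk_congr _ _ _ _ _ hlen (fun j hj1 _ => hne j (by omega)) hr, rfl⟩
    · rw [if_neg hcase]
      exact ⟨h1, pvSegOk_congr _ _ _ _ _ hlen (fun j _ hj2 => hne j (by omega)) hl,
        ihr _ _ hr (by omega) hi2, rfl⟩

theorem pvBuild_ok (caps : List Int) (n lo hi : Nat) (hf : hi - lo ≤ n)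
    (h1 : lo < hi) (h2 : hi ≤ caps.length) : pvSegOk (pvBuild caps lo hi) caps lo hi := by
  induction n generalizing lo hi with
  | zero => omega
  | succ n ih =>
    rw [pvBuild]
    by_cases hc : hi ≤ lo + 1
    · rw [if_pos hc]
      exact ⟨by omega, by omega, rfl⟩
    · rw [if_neg hc]
      exact ⟨by omega, ih lo ((lo + hi) / 2) (by omega) (by omega) (by omega),
        ih ((lo + hi) / 2) hi (by omega) (by omega) h2, rfl⟩

-- A's scan = pvFirstFit over free_spaces[:-1]
theorem pvMtfsLoop_eq (xs : List Int) (s : Nat) (fi fsz : Int) :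
    pvMtfsLoop (PySem.List.enumerate xs (s : Int)) fi fsz = pvFirstFit xs s fi fsz := by
  induction xs generalizing s with
  | nil => rfl
  | cons c rest ih =>
    rw [PySem.List.enumerate_cons]
    simp only [pvMtfsLoop, pvFirstFit]
    by_cases hc : (s : Int) < fi ∧ fsz ≤ c
    · rw [if_pos (by omega), if_pos hc]
    · rw [if_neg (by omega), if_neg hc]
      have : (s : Int) + 1 = ((s + 1 : Nat) : Int) := by push_cast; ring
      rw [this, ih]

theorem move_to_free_space_eq (file : Int × Int) (fs : List Int) :
    move_to_free_space file fs = pvFirstFit fs.dropLast 0 file.1 file.2 := by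
  unfold move_to_free_space
  rw [PySem.List.slice_to_neg_one]
  exact pvMtfsLoop_eq fs.dropLast 0 file.1 file.2

theorem dropLast_eq_seg (fs : List Int) : fs.dropLast = pvSegSeg fs 0 (fs.length - 1) := by
  unfold pvSegSeg
  simp [List.dropLast_eq_take]

-- one synchronized loop step
theorem pvStep_eq (N : Nat) (d : PySem.Dict Int (List (Int × Int))) (fs : List Int)
    (t : PvSeg) (f : Int × Int) (hN : fs.length = N) (h2 : 2 ≤ N)
    (hok : pvSegOk t fs 0 (N - 1)) :
    (pvStepB (N - 1) (t, d, fs) f).2.1 = (pvStepA (d, fs) f).1 ∧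
    (pvStepB (N - 1) (t, d, fs) f).2.2 = (pvStepA (d, fs) f).2 ∧
    (pvStepA (d, fs) f).2.length = N ∧
    pvSegOk (pvStepB (N - 1) (t, d, fs) f).1 ((pvStepA (d, fs) f).2) 0 (N - 1) := by
  have hseg : fs.dropLast = pvSegSeg fs 0 (N - 1) := by rw [dropLast_eq_seg, hN]
  have hlen : (pvSegSeg fs 0 (N - 1)).length = N - 1 :=
    pvSegSeg_length _ _ _ (by omega) (by omega)
  have hidx : pvQuery t 0 (N - 1) (min f.1 ((N - 1 : Nat) : Int)) f.2 =
      move_to_free_space f fs := by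
    rw [pvQuery_eq t fs 0 (N - 1) _ _ hok, move_to_free_space_eq, hseg]
    have := pvFirstFit_min (pvSegSeg fs 0 (N - 1)) 0 f.1 ((N - 1 : Nat) : Int) f.2
      (by rw [hlen]; push_cast; omega)
    simpa using this
  have hbound : move_to_free_space f fs ≥ 0 →
      0 ≤ move_to_free_space f fs ∧ move_to_free_space f fs < ((N - 1 : Nat) : Int) := by
    intro hge
    rw [move_to_free_space_eq, hseg] at hge ⊢
    rcases pvFirstFit_cases (pvSegSeg fs 0 (N - 1)) 0 f.1 f.2 with hv | hv
    · omega
    · rw [hlen] at hv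
      push_cast at hv ⊢
      omega
  simp only [pvStepA, pvStepB, hidx]
  by_cases hge : move_to_free_space f fs ≥ 0
  · rw [if_pos hge, if_pos hge]
    obtain ⟨hge0, hlt⟩ := hbound hge
    refine ⟨?_, rfl, by simp [hN], ?_⟩
    · dsimp only
      by_cases hcont : d.contains (move_to_free_space f fs) = true
      · rw [PySem.Dict.setdefault_of_contains d _ hcont, if_pos hcont]
      · rw [PySem.Dict.setdefault_of_not_contains d _ (by simpa using hcont), if_neg hcont]
        simp [PySem.Dict.modify, PySem.Dict.getD_insert_self, PySem.Dict.insert_insert_self]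
    · dsimp only
      exact pvUpdate_ok t fs 0 (N - 1) (move_to_free_space f fs).toNat f.2 hok
        (Nat.zero_le _) (by omega)
  · rw [if_neg hge, if_neg hge]
    exact ⟨rfl, rfl, hN, hok⟩

-- synchronized loops
theorem pvLoop_eq (l : List (Int × Int)) (N : Nat) (d : PySem.Dict Int (List (Int × Int)))
    (fs : List Int) (t : PvSeg) (hN : fs.length = N) (h2 : 2 ≤ N)
    (hok : pvSegOk t fs 0 (N - 1)) :
    (l.foldl pvStepA (d, fs)).1 = (l.foldl (pvStepB (N - 1)) (t, d, fs)).2.1 := by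
  induction l generalizing d fs t with
  | nil => rfl
  | cons f rest ih =>
    obtain ⟨e1, e2, e3, e4⟩ := pvStep_eq N d fs t f hN h2 hok
    simp only [List.foldl_cons]
    have hA : pvStepA (d, fs) f = ((pvStepA (d, fs) f).1, (pvStepA (d, fs) f).2) := rfl
    have hB : pvStepB (N - 1) (t, d, fs) f =
        ((pvStepB (N - 1) (t, d, fs) f).1, (pvStepB (N - 1) (t, d, fs) f).2.1,
         (pvStepB (N - 1) (t, d, fs) f).2.2) := rfl
    rw [hA, hB, e1, e2]
    exact ih _ _ _ e3 e4

-- degenerate case: at most one free slot means nothing ever moves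
theorem pvLoop_trivial (l : List (Int × Int)) (d : PySem.Dict Int (List (Int × Int)))
    (fs : List Int) (hfs : fs.length ≤ 1) : l.foldl pvStepA (d, fs) = (d, fs) := by
  induction l generalizing d with
  | nil => rfl
  | cons f rest ih =>
    have hdl : fs.dropLast = [] := by
      cases fs with
      | nil => rfl
      | cons a as =>
        simp at hfs
        subst hfs
        rfl
    have hm : move_to_free_space f fs = -1 := by
      rw [move_to_free_space_eq, hdl]; rfl
    simp only [List.foldl_cons, pvStepA, hm]
    rw [if_neg (by omega)]
    exact ih d

-- ===== VERDICT (by name: the statement is the Claim_ definition above) =====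
theorem get_moved_files_spec : Claim_equal_get_moved_files := by
  unfold Claim_equal_get_moved_files
  intro files free_spaces _
  unfold Spec_get_moved_files get_moved_files get_moved_files_alt
  by_cases hlen : free_spaces.length ≤ 1
  · rw [if_pos hlen, pvLoop_trivial _ _ _ hlen]
    rfl
  · rw [if_neg hlen]
    exact congrArg PySem.Dict.items
      (pvLoop_eq files.reverse free_spaces.length PySem.Dict.empty free_spaces _
        rfl (by omega)
        (pvBuild_ok free_spaces (free_spaces.length - 1) 0 (free_spaces.length - 1)
          (by omega) (by omega) (by omega)))
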